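-- pv_equiv track=rewrite | github.com/sohyun76/ErrorMessage-driven-Template | EM_Template/SooNLTK.py | sso_pos_tag
-- ===== SOURCE A (Python) =====
-- def sso_pos_tag(tags):
--     # 필터링할 품사 리스트 (동사, 전치사)
--     filter_tags = ["VB", "IN","TO","Quo",".",":"]
--
--     # 품사 태그에서 필터링할 품사를 제외한 태그들은 모두 NNs로 변경
--     new_text_list = []
--     for word,tag in tags:
--         if tag in filter_tags:
--             new_text_list.append(word)
--         else:
--             if word == '"' or word == "'":
--                 continue
--             if len(new_text_list) > 0 and new_text_list[-1] == 'NNs':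
--                 continue
--             else:
--                 new_text_list.append('NNs')
--     # 새로운 품사 태그로부터 문장 생성
--     #new_text = "-".join([token for token, tag in zip(tokens, new_tags) if tag != ""])
--     new_text = "-".join(new_text_list)
--     return new_text
-- ===== SOURCE B (Python) =====
-- def sso_pos_tag(tags):
--     # pass 1: classify each (word, tag) into kept word or a marker (None = "make this an NNs")
--     filter_tags = {"VB", "IN", "TO", "Quo", ".", ":"}
--     tokens = []
--     for word, tag in tags:
--         if tag in filter_tags:
--             tokens.append(word)
--         elif word != '"' and word != "'":
--             tokens.append(None)
--     # pass 2: render markers as 'NNs', dropping a marker when the last emitted string is 'NNs'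
--     out = []
--     for tok in tokens:
--         if tok is None:
--             if not (out and out[-1] == 'NNs'):
--                 out.append('NNs')
--         else:
--             out.append(tok)
--     return "-".join(out)
-- ===== Notes on version B (the rewrite author's own statement) =====
-- stated objective: alternative
-- what changed: Splits A's single stateful loop into two passes: a pure classification pass producing kept words and marker tokens, then a separate rendering pass that collapses consecutive markers; same cost, different decomposition.
import Mathlib
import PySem

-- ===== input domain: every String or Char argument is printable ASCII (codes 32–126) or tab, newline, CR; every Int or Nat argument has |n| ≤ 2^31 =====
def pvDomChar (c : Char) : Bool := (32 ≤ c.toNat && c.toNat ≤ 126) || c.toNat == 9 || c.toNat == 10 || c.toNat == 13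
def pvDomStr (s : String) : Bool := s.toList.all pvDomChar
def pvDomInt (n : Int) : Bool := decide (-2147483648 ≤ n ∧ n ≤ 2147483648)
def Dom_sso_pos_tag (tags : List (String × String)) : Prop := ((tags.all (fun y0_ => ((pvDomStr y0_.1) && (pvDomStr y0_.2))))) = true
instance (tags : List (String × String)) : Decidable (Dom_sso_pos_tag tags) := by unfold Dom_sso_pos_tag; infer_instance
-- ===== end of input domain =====

-- B: same task as two passes (classify then collapse) instead of one stateful loop; same cost.
-- ===== PORT A =====
def ssoFilterTags : List String := ["VB", "IN", "TO", "Quo", ".", ":"]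

def ssoStepA (acc : List String) (p : String × String) : List String :=
  if ssoFilterTags.contains p.2 then acc ++ [p.1]
  else if p.1 = "\"" ∨ p.1 = "'" then acc
  else if 0 < acc.length ∧ PySem.List.pyGet? acc (-1) = some "NNs" then acc
  else acc ++ ["NNs"]

def sso_pos_tag (tags : List (String × String)) : String :=
  PySem.Str.join "-" (tags.foldl ssoStepA [])

-- ===== PORT B =====
-- pass 1: classify each pair into a kept word (some w) or a marker (none); quotes dropped
def ssoStepB1 (acc : List (Option String)) (p : String × String) : List (Option String) :=
  if ssoFilterTags.contains p.2 then acc ++ [some p.1]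
  else if p.1 ≠ "\"" ∧ p.1 ≠ "'" then acc ++ [none]
  else acc

-- pass 2: render markers as "NNs", dropping a marker when the last emitted string is "NNs"
def ssoStepB2 (acc : List String) (tok : Option String) : List String :=
  match tok with
  | none => if ¬ (acc ≠ [] ∧ PySem.List.pyGet? acc (-1) = some "NNs") then acc ++ ["NNs"] else acc
  | some w => acc ++ [w]

def sso_pos_tag_alt (tags : List (String × String)) : String :=
  PySem.Str.join "-" ((tags.foldl ssoStepB1 []).foldl ssoStepB2 [])

-- ===== PRECONDITION & SPEC =====
def Spec_sso_pos_tag (tags : List (String × String)) (out : String) : Prop := out = sso_pos_tag_alt tags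
instance (tags : List (String × String)) (out : String) : Decidable (Spec_sso_pos_tag tags out) := by unfold Spec_sso_pos_tag; infer_instance

-- ===== CLAIM (what is proved, stated in full; the proofs are below) =====
def Claim_equal_sso_pos_tag : Prop := ∀ (tags : List (String × String)), Dom_sso_pos_tag tags → Spec_sso_pos_tag tags (sso_pos_tag tags)

-- ===== LEMMAS AND PROOFS =====



-- per-element classification result (proof helper)
def ssoClassify (p : String × String) : List (Option String) :=
  if ssoFilterTags.contains p.2 then [some p.1]
  else if p.1 ≠ "\"" ∧ p.1 ≠ "'" then [none]
  else []

theorem ssoStepB1_eq (acc : List (Option String)) (p : String × String) :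
    ssoStepB1 acc p = acc ++ ssoClassify p := by
  unfold ssoStepB1 ssoClassify
  split_ifs <;> simp

theorem ssoStepA_eq (acc : List String) (p : String × String) :
    ssoStepA acc p = (ssoClassify p).foldl ssoStepB2 acc := by
  unfold ssoStepA ssoClassify ssoStepB2
  by_cases h1 : p.2 ∈ ssoFilterTags <;> by_cases h2 : p.1 = "\"" <;> by_cases h3 : p.1 = "'" <;>
    by_cases h4 : PySem.List.pyGet? acc (-1) = some "NNs" <;> cases acc <;> simp_all

theorem sso_main (tags : List (String × String)) (acc : List String) :
    tags.foldl ssoStepA acc = (tags.flatMap ssoClassify).foldl ssoStepB2 acc := by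
  induction tags generalizing acc with
  | nil => rfl
  | cons p rest ih =>
      simp only [List.foldl_cons, List.flatMap_cons, List.foldl_append]
      rw [ssoStepA_eq, ih]

theorem ssoB1_flatMap (tags : List (String × String)) :
    tags.foldl ssoStepB1 [] = tags.flatMap ssoClassify := by
  have h : ∀ (l : List (String × String)) (acc : List (Option String)),
      l.foldl ssoStepB1 acc = l.foldl (fun acc p => acc ++ ssoClassify p) acc := by
    intro l
    induction l with
    | nil => intro acc; rfl
    | cons p rest ih => intro acc; simp only [List.foldl_cons, ssoStepB1_eq]; exact ih _
  rw [h, PySem.List.foldl_append_eq_flatMap, List.nil_append]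

-- ===== VERDICT (by name: the statement is the Claim_ definition above) =====
theorem sso_pos_tag_spec : Claim_equal_sso_pos_tag := by
  intro tags _
  unfold Spec_sso_pos_tag sso_pos_tag sso_pos_tag_alt
  rw [ssoB1_flatMap, sso_main]
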